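-- pv_equiv track=rewrite | github.com/elhussein-salah/bioinformatics-algorithms | src/core/indexing.py | build_inverse_suffix_array
-- ===== SOURCE A (Python) =====
-- def build_suffix_array_simple(text: str) -> list[int]:
--     """
--     Build a simple suffix array that returns only the position indices.
--
--     Args:
--         text: The text to build suffix array for
--
--     Returns:
--         List of starting positions of sorted suffixes
--     """
--     if not text:
--         return []
--
--     # Generate all suffixes with their positions
--     suffixes = [(text[i:], i) for i in range(len(text))]
--
--     # Sort suffixes alphabetically
--     sorted_suffixes = sorted(suffixes, key=lambda x: x[0])
--
--     # Return only the positions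
--     return [pos for _, pos in sorted_suffixes]
--
-- def build_inverse_suffix_array(text: str) -> list[int]:
--     """
--     Build the inverse suffix array for a text string.
--
--     The inverse suffix array maps each position i in the original text
--     to its rank in the sorted order of suffixes. If suffix_array[j] = i,
--     then inverse_suffix_array[i] = j.
--
--     Args:
--         text: The text to build inverse suffix array for
--
--     Returns:
--         List where inverse_sa[i] gives the rank of suffix starting at position i
--
--     Example:
--         >>> text = "banana"
--         >>> sa = build_suffix_array_simple(text)  # [5, 3, 1, 0, 4, 2]
--         >>> isa = build_inverse_suffix_array(text)  # [3, 2, 5, 1, 4, 0]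
--         >>> # Verification: for all i, isa[sa[i]] == i
--     """
--     if not text:
--         return []
--
--     # First build the suffix array
--     suffix_array = build_suffix_array_simple(text)
--
--     # Build inverse suffix array
--     n = len(text)
--     inverse_sa = [0] * n
--
--     for rank, position in enumerate(suffix_array):
--         inverse_sa[position] = rank
--
--     return inverse_sa
-- ===== SOURCE B (Python) =====
-- def build_inverse_suffix_array(text: str) -> list[int]:
--     """Rank each suffix directly: isa[i] = number of suffixes strictly
--     smaller than the suffix starting at i (all suffixes are distinct,
--     so this is exactly its rank in sorted order). No sort, no inversion."""
--     suffixes = [text[i:] for i in range(len(text))]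
--     return [sum(1 for s in suffixes if s < si) for si in suffixes]
-- ===== Notes on version B (the rewrite author's own statement) =====
-- stated objective: simpler
-- what changed: Instead of sorting all suffixes and then inverting the resulting suffix array, B computes each rank directly as the number of strictly smaller suffixes (suffixes are pairwise distinct), eliminating both the sort and the inversion pass.
import Mathlib
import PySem

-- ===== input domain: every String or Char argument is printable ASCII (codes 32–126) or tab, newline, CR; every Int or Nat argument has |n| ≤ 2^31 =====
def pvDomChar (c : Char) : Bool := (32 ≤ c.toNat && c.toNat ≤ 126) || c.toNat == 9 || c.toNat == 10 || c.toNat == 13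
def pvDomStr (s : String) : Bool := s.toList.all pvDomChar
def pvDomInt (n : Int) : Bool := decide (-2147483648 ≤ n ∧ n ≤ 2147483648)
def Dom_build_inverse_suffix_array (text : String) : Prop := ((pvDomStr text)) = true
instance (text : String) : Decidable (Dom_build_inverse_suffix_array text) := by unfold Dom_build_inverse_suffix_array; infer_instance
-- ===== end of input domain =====

-- B replaces A's sort-then-invert by ranking each suffix directly as the number of
-- strictly smaller suffixes; objective: simpler (no sort and no inversion pass).

-- ===== PORT A =====
def build_suffix_array_simple (text : String) : List Int :=
  if PySem.Str.len text == 0 then []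
  else
    let suffixes := (PySem.List.pyRange 0 (PySem.Str.len text) 1).map
      (fun i => (PySem.Str.slice text (some i) none, i))
    let sorted_suffixes := PySem.List.sorted suffixes (fun x => x.1)
    sorted_suffixes.map (fun x => x.2)

def build_inverse_suffix_array (text : String) : List Int :=
  if PySem.Str.len text == 0 then []
  else
    let suffix_array := build_suffix_array_simple text
    let n := PySem.Str.len text
    let inverse_sa := List.replicate n.toNat (0 : Int)
    (PySem.List.enumerate suffix_array 0).foldl
      (fun acc rp => PySem.List.pySetD acc rp.2 rp.1) inverse_sa

-- ===== PORT B =====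
def build_inverse_suffix_array_alt (text : String) : List Int :=
  let suffixes := (PySem.List.pyRange 0 (PySem.Str.len text) 1).map
    (fun i => PySem.Str.slice text (some i) none)
  suffixes.map (fun si => (suffixes.map (fun s => if s < si then (1 : Int) else 0)).sum)

-- ===== PRECONDITION & SPEC =====
def Spec_build_inverse_suffix_array (text : String) (out : List Int) : Prop := out = build_inverse_suffix_array_alt text
instance (text : String) (out : List Int) : Decidable (Spec_build_inverse_suffix_array text out) := by unfold Spec_build_inverse_suffix_array; infer_instance

-- ===== CLAIM (what is proved, stated in full; the proofs are below) =====
def Claim_equal_build_inverse_suffix_array : Prop := ∀ (text : String), Dom_build_inverse_suffix_array text → Spec_build_inverse_suffix_array text (build_inverse_suffix_array text)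

-- ===== LEMMAS AND PROOFS =====

theorem rank_eq_countP_lt {α κ : Type} [LinearOrder κ] (key : α → κ) :
    ∀ (pre : List α) (x : α) (suf : List α),
      (pre ++ x :: suf).Pairwise (fun a b => key a < key b) →
      (pre ++ x :: suf).countP (fun y => decide (key y < key x)) = pre.length := by
  intro pre
  induction pre with
  | nil =>
    intro x suf hp
    simp only [List.nil_append, List.length_nil]
    simp only [List.nil_append] at hp
    rw [List.pairwise_cons] at hp
    apply List.countP_eq_zero.mpr
    intro z hz
    rcases List.mem_cons.mp hz with h | h
    · subst h; simp
    · simp only [decide_eq_true_eq]; exact not_lt_of_gt (hp.1 z h)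
  | cons p pre ih =>
    intro x suf hp
    rw [List.cons_append, List.pairwise_cons] at hp
    rw [List.cons_append, List.countP_cons_of_pos, ih x suf hp.2, List.length_cons]
    simp only [decide_eq_true_eq]
    exact hp.1 x (by simp)

theorem setloop_untouched (ps : List Int) :
    ∀ (s : Int) (init : List Int) (j : Nat),
      (∀ p ∈ ps, 0 ≤ p) → (∀ p ∈ ps, p.toNat ≠ j) →
      ((PySem.List.enumerate ps s).foldl
        (fun acc rp => PySem.List.pySetD acc rp.2 rp.1) init)[j]? = init[j]? := by
  induction ps with
  | nil => intro s init j _ _; simp [PySem.List.enumerate_nil]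
  | cons p t ih =>
    intro s init j h0 hne
    rw [PySem.List.enumerate_cons, List.foldl_cons]
    rw [ih (s+1) _ j (fun q hq => h0 q (List.mem_cons_of_mem _ hq))
        (fun q hq => hne q (List.mem_cons_of_mem _ hq))]
    rw [PySem.List.pySetD_of_nonneg _ _ (h0 p List.mem_cons_self)]
    exact List.getElem?_set_ne (hne p List.mem_cons_self)

theorem setloop_hit (ps : List Int) :
    ∀ (s : Int) (init : List Int),
      (∀ p ∈ ps, 0 ≤ p ∧ p.toNat < init.length) → ps.Nodup →
      ∀ (k : Nat) (hk : k < ps.length),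
        ((PySem.List.enumerate ps s).foldl
          (fun acc rp => PySem.List.pySetD acc rp.2 rp.1) init)[(ps[k]).toNat]?
        = some (s + k) := by
  induction ps with
  | nil => intro s init _ _ k hk; simp at hk
  | cons p t ih =>
    intro s init hb hnd k hk
    rw [List.nodup_cons] at hnd
    obtain ⟨hpt, hndt⟩ := hnd
    rw [PySem.List.enumerate_cons, List.foldl_cons]
    cases k with
    | zero =>
      simp only [List.getElem_cons_zero]
      rw [setloop_untouched t (s+1) _ p.toNat
          (fun q hq => (hb q (List.mem_cons_of_mem _ hq)).1)
          (fun q hq h => hpt (by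
            have h0q := (hb q (List.mem_cons_of_mem _ hq)).1
            have h0p := (hb p List.mem_cons_self).1
            have : q = p := by omega
            exact this ▸ hq))]
      rw [PySem.List.pySetD_of_nonneg _ _ (hb p List.mem_cons_self).1]
      rw [List.getElem?_set_self (by simpa using (hb p List.mem_cons_self).2)]
      norm_num
    | succ k =>
      simp only [List.getElem_cons_succ]
      have hk' : k < t.length := by simpa using hk
      rw [ih (s+1) _ (fun q hq => by
            have := hb q (List.mem_cons_of_mem _ hq)
            simpa [PySem.List.length_pySetD] using this) hndt k hk']
      congr 1
      push_cast
      ring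

theorem setloop_length (ps : List Int) :
    ∀ (s : Int) (init : List Int),
      ((PySem.List.enumerate ps s).foldl
        (fun acc rp => PySem.List.pySetD acc rp.2 rp.1) init).length = init.length := by
  induction ps with
  | nil => intro s init; simp [PySem.List.enumerate_nil]
  | cons p t ih =>
    intro s init
    rw [PySem.List.enumerate_cons, List.foldl_cons, ih, PySem.List.length_pySetD]

-- A's sort-then-invert loop equals B's direct ranking, for any injective suffix map f.
theorem central (f : Int → String) (n : Nat)
    (hinj : ∀ i j : Int, 0 ≤ i → i < n → 0 ≤ j → j < n → f i = f j → i = j) :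
    (PySem.List.enumerate
        ((PySem.List.sorted ((PySem.List.pyRange 0 (n : Int) 1).map (fun i => (f i, i)))
            (fun x => x.1)).map (fun x => x.2)) 0).foldl
      (fun acc rp => PySem.List.pySetD acc rp.2 rp.1) (List.replicate n (0 : Int))
    = ((PySem.List.pyRange 0 (n : Int) 1).map f).map
        (fun si => (((PySem.List.pyRange 0 (n : Int) 1).map f).map
          (fun s => if s < si then (1 : Int) else 0)).sum) := by
  set idxs := PySem.List.pyRange 0 (n : Int) 1 with hidxs
  set pairs := idxs.map (fun i => (f i, i)) with hpairs
  set ss := PySem.List.sorted pairs (fun x => x.1) with hss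
  set ps := ss.map (fun x => x.2) with hps
  set sufs := idxs.map f with hsufs
  have hlen_idxs : idxs.length = n := by
    simp [hidxs, PySem.List.length_pyRange_one]
  have hperm : ss.Perm pairs := PySem.List.sorted_perm _ _ _
  have hps_perm : ps.Perm idxs := by
    have h := hperm.map (fun x : String × Int => x.2)
    simpa [hpairs, List.map_map, Function.comp_def] using h
  have hmem_ps : ∀ p ∈ ps, 0 ≤ p ∧ p < (n : Int) := by
    intro p hp
    have := hps_perm.mem_iff.mp hp
    rw [hidxs, PySem.List.mem_pyRange_one] at this
    exact this
  have hnodup_ps : ps.Nodup := (hps_perm.nodup_iff).mpr (by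
    rw [hidxs]; exact PySem.List.nodup_pyRange_one 0 (n : Int))
  have hkeys : (ss.map (fun x => x.1)).Nodup := by
    have h1 : (pairs.map (fun x : String × Int => x.1)).Nodup := by
      rw [hpairs, List.map_map]
      apply List.Nodup.map_on
      · intro x hx y hy hfx
        rw [hidxs, PySem.List.mem_pyRange_one] at hx hy
        exact hinj x y hx.1 hx.2 hy.1 hy.2 hfx
      · rw [hidxs]; exact PySem.List.nodup_pyRange_one 0 (n : Int)
    exact ((hperm.map (fun x : String × Int => x.1)).nodup_iff).mpr h1
  have hstrict : ss.Pairwise (fun a b => a.1 < b.1) := by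
    have hle : ss.Pairwise (fun a b => a.1 ≤ b.1) :=
      PySem.List.sorted_pairwise pairs (fun x => x.1)
    have hne : ss.Pairwise (fun a b => a.1 ≠ b.1) := List.pairwise_map.mp hkeys
    exact (hle.and hne).imp (fun h => lt_of_le_of_ne h.1 h.2)
  have hshape : ∀ x ∈ ss, x = (f x.2, x.2) := by
    intro x hx
    have : x ∈ pairs := hperm.mem_iff.mp hx
    rw [hpairs] at this
    obtain ⟨i, _, rfl⟩ := List.mem_map.mp this
    rfl
  have hss_len : ss.length = n := by
    rw [hss, PySem.List.length_sorted, hpairs, List.length_map, hlen_idxs]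
  have hps_len : ps.length = n := by rw [hps, List.length_map, hss_len]
  have hsufs_len : sufs.length = n := by rw [hsufs, List.length_map, hlen_idxs]
  apply List.ext_getElem?
  intro i
  by_cases hi : i < n
  · have hilt : (i : Int) < (n : Int) := by exact_mod_cast hi
    have hi_mem : (i : Int) ∈ ps := hps_perm.mem_iff.mpr (by
      rw [hidxs, PySem.List.mem_pyRange_one]
      exact ⟨Int.natCast_nonneg i, hilt⟩)
    obtain ⟨k, hk, hpk⟩ := List.getElem_of_mem hi_mem
    have hbounds : ∀ p ∈ ps, 0 ≤ p ∧ p.toNat < (List.replicate n (0 : Int)).length := by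
      intro p hp
      have h := hmem_ps p hp
      refine ⟨h.1, ?_⟩
      simp only [List.length_replicate]
      omega
    have hhit := setloop_hit ps 0 (List.replicate n (0 : Int)) hbounds hnodup_ps k hk
    rw [hpk] at hhit
    simp only [Int.toNat_natCast, zero_add] at hhit
    have hk' : k < ss.length := by
      have h := hk
      rwa [hps, List.length_map] at h
    have hx2 : (ss[k]'hk').2 = (i : Int) := by
      rw [← hpk]
      simp [hps]
    have hxeq : ss[k]'hk' = (f (i : Int), (i : Int)) := by
      have h := hshape _ (List.getElem_mem hk')
      rw [h, hx2]
    have hdecomp : ss.take k ++ ss[k]'hk' :: ss.drop (k + 1) = ss := by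
      rw [List.getElem_cons_drop hk', List.take_append_drop]
    have hrank := rank_eq_countP_lt (fun x : String × Int => x.1) (ss.take k)
      (ss[k]'hk') (ss.drop (k + 1)) (by rw [hdecomp]; exact hstrict)
    rw [hdecomp] at hrank
    rw [hxeq] at hrank
    simp only [List.length_take, min_eq_left (le_of_lt hk')] at hrank
    have hcount : ss.countP (fun y => decide (y.1 < f (i : Int)))
        = sufs.countP (fun s => decide (s < f (i : Int))) := by
      rw [hperm.countP_eq, hpairs, List.countP_map, hsufs, List.countP_map]
      rfl
    rw [hhit]
    rw [List.getElem?_map, hsufs, List.getElem?_map, hidxs,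
      PySem.List.getElem?_pyRange_one, if_pos (by simp [hi])]
    simp only [Option.map_some, zero_add]
    have hite : (fun s : String => if s < f (i : Int) then (1 : Int) else 0)
        = (fun s => if (decide (s < f (i : Int))) = true then (1 : Int) else 0) := by
      funext s; simp
    rw [hite, PySem.List.sum_map_ite_one_zero, ← hcount, hrank]
  · -- both none
    rw [List.getElem?_eq_none, List.getElem?_eq_none]
    · simp only [List.length_map]; omega
    · rw [setloop_length, List.length_replicate]; omega

-- Distinct suffixes: the suffix slice map is injective on [0, n).
theorem suffix_slice_inj (text : String) :
    ∀ i j : Int, 0 ≤ i → i < (text.toList.length : Int) → 0 ≤ j → j < (text.toList.length : Int) →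
      PySem.Str.slice text (some i) none = PySem.Str.slice text (some j) none → i = j := by
  intro i j h0i hi h0j hj heq
  have hlength : ∀ (m : Int), 0 ≤ m →
      (PySem.Str.slice text (some m) none).toList.length = text.toList.length - m.toNat := by
    intro m hm
    simp [PySem.Str.slice, PySem.List.slice_from _ hm]
  have h := congrArg (fun s : String => s.toList.length) heq
  simp only [hlength i h0i, hlength j h0j] at h
  omega

theorem build_inverse_suffix_array_main (text : String) :
    build_inverse_suffix_array text = build_inverse_suffix_array_alt text := by
  unfold build_inverse_suffix_array build_suffix_array_simple build_inverse_suffix_array_alt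
  rw [PySem.Str.len_eq]
  by_cases h0 : text.toList.length = 0
  · rw [h0]
    simp [PySem.List.pyRange_one_eq_nil (le_refl 0)]
  · have hne : (((text.toList.length : Nat) : Int) == 0) = false := by
      simp only [beq_eq_false_iff_ne, ne_eq, Nat.cast_eq_zero]
      omega
    rw [hne]
    simp only [Bool.false_eq_true, if_false, Int.toNat_natCast]
    exact central (fun i => PySem.Str.slice text (some i) none) text.toList.length
      (fun i j h0i hi h0j hj heq => suffix_slice_inj text i j h0i hi h0j hj heq)

-- ===== VERDICT (by name: the statement is the Claim_ definition above) =====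
theorem build_inverse_suffix_array_spec : Claim_equal_build_inverse_suffix_array := by
  intro text _
  unfold Spec_build_inverse_suffix_array
  exact build_inverse_suffix_array_main text
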